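-- pv_equiv track=rewrite | github.com/denishdholaria/bijmantra | backend/scripts/validate_api_registry.py | categorize_routes_by_domain
-- ===== SOURCE A (Python) =====
-- from typing import Dict, List, Set, Tuple
--
-- def categorize_routes_by_domain(routes: List[Tuple[str, str, str]]) -> Dict[str, List[Tuple]]:
--     """Categorize routes by domain based on URL path."""
--     domain_routes = {
--         "core": [],
--         "breeding": [],
--         "genomics": [],
--         "phenotyping": [],
--         "germplasm": [],
--         "environment": [],
--         "spatial": [],
--         "ai": [],
--         "interop": [],
--         "brapi": [],
--         "uncategorized": [],
--     }
--
--     for method, path, endpoint_name in routes: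
--         # Skip OpenAPI/docs endpoints
--         if path in ["/openapi.json", "/docs", "/redoc", "/health"]:
--             continue
--
--         # Categorize by path prefix
--         if "/api/v2/core" in path or "/auth" in path or "/users" in path:
--             domain_routes["core"].append((method, path, endpoint_name))
--         elif "/api/v2/breeding" in path or "/crosses" in path or "/trials" in path:
--             domain_routes["breeding"].append((method, path, endpoint_name))
--         elif "/api/v2/genomics" in path or "/gwas" in path or "/markers" in path:
--             domain_routes["genomics"].append((method, path, endpoint_name))
--         elif "/api/v2/phenotyping" in path or "/phenotype" in path or "/observations" in path:
--             domain_routes["phenotyping"].append((method, path, endpoint_name))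
--         elif "/api/v2/germplasm" in path or "/germplasm" in path:
--             domain_routes["germplasm"].append((method, path, endpoint_name))
--         elif "/api/v2/environment" in path or "/weather" in path or "/climate" in path:
--             domain_routes["environment"].append((method, path, endpoint_name))
--         elif "/api/v2/spatial" in path or "/maps" in path or "/location" in path:
--             domain_routes["spatial"].append((method, path, endpoint_name))
--         elif "/api/v2/ai" in path or "/veena" in path or "/reevu" in path:
--             domain_routes["ai"].append((method, path, endpoint_name))
--         elif "/brapi" in path:
--             domain_routes["brapi"].append((method, path, endpoint_name))
--         elif "/api/v2/interop" in path or "/integration" in path: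
--             domain_routes["interop"].append((method, path, endpoint_name))
--         else:
--             domain_routes["uncategorized"].append((method, path, endpoint_name))
--
--     return domain_routes
-- ===== SOURCE B (Python) =====
-- from typing import Dict, List, Tuple
--
-- _DOCS = {"/openapi.json", "/docs", "/redoc", "/health"}
--
-- # Priority-ordered rule table (same priority as A's elif chain: brapi before interop).
-- _RULES = [
--     ("core", ["/api/v2/core", "/auth", "/users"]),
--     ("breeding", ["/api/v2/breeding", "/crosses", "/trials"]),
--     ("genomics", ["/api/v2/genomics", "/gwas", "/markers"]),
--     ("phenotyping", ["/api/v2/phenotyping", "/phenotype", "/observations"]),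
--     ("germplasm", ["/api/v2/germplasm", "/germplasm"]),
--     ("environment", ["/api/v2/environment", "/weather", "/climate"]),
--     ("spatial", ["/api/v2/spatial", "/maps", "/location"]),
--     ("ai", ["/api/v2/ai", "/veena", "/reevu"]),
--     ("brapi", ["/brapi"]),
--     ("interop", ["/api/v2/interop", "/integration"]),
-- ]
--
-- # Output key order of A's result dict (insertion order: interop before brapi).
-- _ORDER = ["core", "breeding", "genomics", "phenotyping", "germplasm",
--           "environment", "spatial", "ai", "interop", "brapi", "uncategorized"]
--
--
-- def _classify(path: str):
--     """Bucket name for a path, or None for docs endpoints."""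
--     if path in _DOCS:
--         return None
--     for name, subs in _RULES:
--         if any(sub in path for sub in subs):
--             return name
--     return "uncategorized"
--
--
-- def categorize_routes_by_domain(routes: List[Tuple[str, str, str]]) -> Dict[str, List[Tuple]]:
--     """Categorize routes by domain based on URL path."""
--     return {name: [r for r in routes if _classify(r[1]) == name] for name in _ORDER}
-- ===== Notes on version B (the rewrite author's own statement) =====
-- stated objective: idiomatic
-- what changed: Replaced the hard-coded elif chain mutating a dict with a declarative priority-ordered rule table plus a classify helper, and built the result as a per-bucket dict comprehension (one filter pass per bucket) instead of a single append loop.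
import Mathlib
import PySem

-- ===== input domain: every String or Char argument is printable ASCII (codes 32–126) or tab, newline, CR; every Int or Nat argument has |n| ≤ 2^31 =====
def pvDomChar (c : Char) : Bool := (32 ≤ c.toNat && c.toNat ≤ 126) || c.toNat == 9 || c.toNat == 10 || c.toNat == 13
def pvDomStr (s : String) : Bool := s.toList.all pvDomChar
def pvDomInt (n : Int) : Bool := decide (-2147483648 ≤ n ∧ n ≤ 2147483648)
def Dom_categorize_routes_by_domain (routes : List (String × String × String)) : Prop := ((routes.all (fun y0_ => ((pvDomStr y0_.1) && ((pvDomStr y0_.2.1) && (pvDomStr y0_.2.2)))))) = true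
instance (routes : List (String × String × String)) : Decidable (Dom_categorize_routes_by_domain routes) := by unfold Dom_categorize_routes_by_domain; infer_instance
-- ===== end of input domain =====

-- B replaces A's hard-coded elif chain mutating a dict by a priority-ordered rule
-- table + classify helper and builds each bucket by a filter pass (idiomatic).


-- ===== PORT A =====
-- one loop iteration of A: skip docs paths, then the elif chain appending into the dict
def pvStepA (d : PySem.Dict String (List (String × String × String)))
    (r : String × String × String) : PySem.Dict String (List (String × String × String)) :=
  let path := r.2.1
  if path ∈ ["/openapi.json", "/docs", "/redoc", "/health"] then d
  else if PySem.Str.isIn "/api/v2/core" path || PySem.Str.isIn "/auth" path || PySem.Str.isIn "/users" path then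
    d.modify "core" [] (· ++ [r])
  else if PySem.Str.isIn "/api/v2/breeding" path || PySem.Str.isIn "/crosses" path || PySem.Str.isIn "/trials" path then
    d.modify "breeding" [] (· ++ [r])
  else if PySem.Str.isIn "/api/v2/genomics" path || PySem.Str.isIn "/gwas" path || PySem.Str.isIn "/markers" path then
    d.modify "genomics" [] (· ++ [r])
  else if PySem.Str.isIn "/api/v2/phenotyping" path || PySem.Str.isIn "/phenotype" path || PySem.Str.isIn "/observations" path then
    d.modify "phenotyping" [] (· ++ [r])
  else if PySem.Str.isIn "/api/v2/germplasm" path || PySem.Str.isIn "/germplasm" path then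
    d.modify "germplasm" [] (· ++ [r])
  else if PySem.Str.isIn "/api/v2/environment" path || PySem.Str.isIn "/weather" path || PySem.Str.isIn "/climate" path then
    d.modify "environment" [] (· ++ [r])
  else if PySem.Str.isIn "/api/v2/spatial" path || PySem.Str.isIn "/maps" path || PySem.Str.isIn "/location" path then
    d.modify "spatial" [] (· ++ [r])
  else if PySem.Str.isIn "/api/v2/ai" path || PySem.Str.isIn "/veena" path || PySem.Str.isIn "/reevu" path then
    d.modify "ai" [] (· ++ [r])
  else if PySem.Str.isIn "/brapi" path then
    d.modify "brapi" [] (· ++ [r])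
  else if PySem.Str.isIn "/api/v2/interop" path || PySem.Str.isIn "/integration" path then
    d.modify "interop" [] (· ++ [r])
  else
    d.modify "uncategorized" [] (· ++ [r])

def categorize_routes_by_domain (routes : List (String × String × String)) : List (String × List (String × String × String)) :=
  let domain_routes : PySem.Dict String (List (String × String × String)) :=
    PySem.Dict.mk [("core", []), ("breeding", []), ("genomics", []), ("phenotyping", []),
      ("germplasm", []), ("environment", []), ("spatial", []), ("ai", []),
      ("interop", []), ("brapi", []), ("uncategorized", [])]
  (routes.foldl pvStepA domain_routes).items

-- ===== PORT B =====
def pvRules : List (String × List String) :=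
  [("core", ["/api/v2/core", "/auth", "/users"]),
   ("breeding", ["/api/v2/breeding", "/crosses", "/trials"]),
   ("genomics", ["/api/v2/genomics", "/gwas", "/markers"]),
   ("phenotyping", ["/api/v2/phenotyping", "/phenotype", "/observations"]),
   ("germplasm", ["/api/v2/germplasm", "/germplasm"]),
   ("environment", ["/api/v2/environment", "/weather", "/climate"]),
   ("spatial", ["/api/v2/spatial", "/maps", "/location"]),
   ("ai", ["/api/v2/ai", "/veena", "/reevu"]),
   ("brapi", ["/brapi"]),
   ("interop", ["/api/v2/interop", "/integration"])]

def pvOrder : List String :=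
  ["core", "breeding", "genomics", "phenotyping", "germplasm",
   "environment", "spatial", "ai", "interop", "brapi", "uncategorized"]

-- Source B's _classify: None for docs paths, else first matching rule, else "uncategorized"
def pvClassify (path : String) : Option String :=
  if path ∈ ["/openapi.json", "/docs", "/redoc", "/health"] then none
  else
    match pvRules.find? (fun rule => rule.2.any (fun sub => PySem.Str.isIn sub path)) with
    | some rule => some rule.1
    | none => some "uncategorized"

def categorize_routes_by_domain_alt (routes : List (String × String × String)) : List (String × List (String × String × String)) :=
  pvOrder.map (fun name => (name, routes.filter (fun r => pvClassify r.2.1 == some name)))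

-- ===== PRECONDITION & SPEC =====
def Spec_categorize_routes_by_domain (routes : List (String × String × String)) (out : List (String × List (String × String × String))) : Prop := out = categorize_routes_by_domain_alt routes
instance (routes : List (String × String × String)) (out : List (String × List (String × String × String))) : Decidable (Spec_categorize_routes_by_domain routes out) := by unfold Spec_categorize_routes_by_domain; infer_instance

-- ===== CLAIM (what is proved, stated in full; the proofs are below) =====
def Claim_equal_categorize_routes_by_domain : Prop := ∀ (routes : List (String × String × String)), Dom_categorize_routes_by_domain routes → Spec_categorize_routes_by_domain routes (categorize_routes_by_domain routes)

-- ===== LEMMAS AND PROOFS =====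

-- the pointwise update performed by one A-step, expressed through B's classifier
def pvBump (f : String → List (String × String × String)) (r : String × String × String)
    (n : String) : List (String × String × String) :=
  match pvClassify r.2.1 with
  | none => f n
  | some k => if n = k then f n ++ [r] else f n

-- one A-step is: look up the bucket B's classifier names, and append there
theorem pvStepA_classify (d : PySem.Dict String (List (String × String × String)))
    (r : String × String × String) :
    pvStepA d r = match pvClassify r.2.1 with
      | none => d
      | some k => d.modify k [] (· ++ [r]) := by
  obtain ⟨m, p, e⟩ := r
  unfold pvStepA
  dsimp only
  by_cases h1 : p ∈ ["/openapi.json", "/docs", "/redoc", "/health"]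
  · have hc : pvClassify p = none := by
      unfold pvClassify
      rw [if_pos h1]
    rw [if_pos h1, hc]
  · rw [if_neg h1]
    by_cases h2 : (PySem.Str.isIn "/api/v2/core" p || PySem.Str.isIn "/auth" p || PySem.Str.isIn "/users" p) = true
    · have hc : pvClassify p = some "core" := by
        unfold pvClassify pvRules
        rw [if_neg h1]
        rw [List.find?_cons_of_pos (by simpa only [List.any_cons, List.any_nil, Bool.or_false, Bool.or_assoc] using h2)]
      rw [if_pos h2, hc]
    · rw [if_neg h2]
      by_cases h3 : (PySem.Str.isIn "/api/v2/breeding" p || PySem.Str.isIn "/crosses" p || PySem.Str.isIn "/trials" p) = true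
      · have hc : pvClassify p = some "breeding" := by
          unfold pvClassify pvRules
          rw [if_neg h1]
          rw [List.find?_cons_of_neg (by simpa only [List.any_cons, List.any_nil, Bool.or_false, Bool.or_assoc] using h2), List.find?_cons_of_pos (by simpa only [List.any_cons, List.any_nil, Bool.or_false, Bool.or_assoc] using h3)]
        rw [if_pos h3, hc]
      · rw [if_neg h3]
        by_cases h4 : (PySem.Str.isIn "/api/v2/genomics" p || PySem.Str.isIn "/gwas" p || PySem.Str.isIn "/markers" p) = true
        · have hc : pvClassify p = some "genomics" := by
            unfold pvClassify pvRules
            rw [if_neg h1]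
            rw [List.find?_cons_of_neg (by simpa only [List.any_cons, List.any_nil, Bool.or_false, Bool.or_assoc] using h2), List.find?_cons_of_neg (by simpa only [List.any_cons, List.any_nil, Bool.or_false, Bool.or_assoc] using h3), List.find?_cons_of_pos (by simpa only [List.any_cons, List.any_nil, Bool.or_false, Bool.or_assoc] using h4)]
          rw [if_pos h4, hc]
        · rw [if_neg h4]
          by_cases h5 : (PySem.Str.isIn "/api/v2/phenotyping" p || PySem.Str.isIn "/phenotype" p || PySem.Str.isIn "/observations" p) = true
          · have hc : pvClassify p = some "phenotyping" := by
              unfold pvClassify pvRules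
              rw [if_neg h1]
              rw [List.find?_cons_of_neg (by simpa only [List.any_cons, List.any_nil, Bool.or_false, Bool.or_assoc] using h2), List.find?_cons_of_neg (by simpa only [List.any_cons, List.any_nil, Bool.or_false, Bool.or_assoc] using h3), List.find?_cons_of_neg (by simpa only [List.any_cons, List.any_nil, Bool.or_false, Bool.or_assoc] using h4), List.find?_cons_of_pos (by simpa only [List.any_cons, List.any_nil, Bool.or_false, Bool.or_assoc] using h5)]
            rw [if_pos h5, hc]
          · rw [if_neg h5]
            by_cases h6 : (PySem.Str.isIn "/api/v2/germplasm" p || PySem.Str.isIn "/germplasm" p) = true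
            · have hc : pvClassify p = some "germplasm" := by
                unfold pvClassify pvRules
                rw [if_neg h1]
                rw [List.find?_cons_of_neg (by simpa only [List.any_cons, List.any_nil, Bool.or_false, Bool.or_assoc] using h2), List.find?_cons_of_neg (by simpa only [List.any_cons, List.any_nil, Bool.or_false, Bool.or_assoc] using h3), List.find?_cons_of_neg (by simpa only [List.any_cons, List.any_nil, Bool.or_false, Bool.or_assoc] using h4), List.find?_cons_of_neg (by simpa only [List.any_cons, List.any_nil, Bool.or_false, Bool.or_assoc] using h5), List.find?_cons_of_pos (by simpa only [List.any_cons, List.any_nil, Bool.or_false, Bool.or_assoc] using h6)]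
              rw [if_pos h6, hc]
            · rw [if_neg h6]
              by_cases h7 : (PySem.Str.isIn "/api/v2/environment" p || PySem.Str.isIn "/weather" p || PySem.Str.isIn "/climate" p) = true
              · have hc : pvClassify p = some "environment" := by
                  unfold pvClassify pvRules
                  rw [if_neg h1]
                  rw [List.find?_cons_of_neg (by simpa only [List.any_cons, List.any_nil, Bool.or_false, Bool.or_assoc] using h2), List.find?_cons_of_neg (by simpa only [List.any_cons, List.any_nil, Bool.or_false, Bool.or_assoc] using h3), List.find?_cons_of_neg (by simpa only [List.any_cons, List.any_nil, Bool.or_false, Bool.or_assoc] using h4), List.find?_cons_of_neg (by simpa only [List.any_cons, List.any_nil, Bool.or_false, Bool.or_assoc] using h5), List.find?_cons_of_neg (by simpa only [List.any_cons, List.any_nil, Bool.or_false, Bool.or_assoc] using h6), List.find?_cons_of_pos (by simpa only [List.any_cons, List.any_nil, Bool.or_false, Bool.or_assoc] using h7)]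
                rw [if_pos h7, hc]
              · rw [if_neg h7]
                by_cases h8 : (PySem.Str.isIn "/api/v2/spatial" p || PySem.Str.isIn "/maps" p || PySem.Str.isIn "/location" p) = true
                · have hc : pvClassify p = some "spatial" := by
                    unfold pvClassify pvRules
                    rw [if_neg h1]
                    rw [List.find?_cons_of_neg (by simpa only [List.any_cons, List.any_nil, Bool.or_false, Bool.or_assoc] using h2), List.find?_cons_of_neg (by simpa only [List.any_cons, List.any_nil, Bool.or_false, Bool.or_assoc] using h3), List.find?_cons_of_neg (by simpa only [List.any_cons, List.any_nil, Bool.or_false, Bool.or_assoc] using h4), List.find?_cons_of_neg (by simpa only [List.any_cons, List.any_nil, Bool.or_false, Bool.or_assoc] using h5), List.find?_cons_of_neg (by simpa only [List.any_cons, List.any_nil, Bool.or_false, Bool.or_assoc] using h6), List.find?_cons_of_neg (by simpa only [List.any_cons, List.any_nil, Bool.or_false, Bool.or_assoc] using h7), List.find?_cons_of_pos (by simpa only [List.any_cons, List.any_nil, Bool.or_false, Bool.or_assoc] using h8)]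
                  rw [if_pos h8, hc]
                · rw [if_neg h8]
                  by_cases h9 : (PySem.Str.isIn "/api/v2/ai" p || PySem.Str.isIn "/veena" p || PySem.Str.isIn "/reevu" p) = true
                  · have hc : pvClassify p = some "ai" := by
                      unfold pvClassify pvRules
                      rw [if_neg h1]
                      rw [List.find?_cons_of_neg (by simpa only [List.any_cons, List.any_nil, Bool.or_false, Bool.or_assoc] using h2), List.find?_cons_of_neg (by simpa only [List.any_cons, List.any_nil, Bool.or_false, Bool.or_assoc] using h3), List.find?_cons_of_neg (by simpa only [List.any_cons, List.any_nil, Bool.or_false, Bool.or_assoc] using h4), List.find?_cons_of_neg (by simpa only [List.any_cons, List.any_nil, Bool.or_false, Bool.or_assoc] using h5), List.find?_cons_of_neg (by simpa only [List.any_cons, List.any_nil, Bool.or_false, Bool.or_assoc] using h6), List.find?_cons_of_neg (by simpa only [List.any_cons, List.any_nil, Bool.or_false, Bool.or_assoc] using h7), List.find?_cons_of_neg (by simpa only [List.any_cons, List.any_nil, Bool.or_false, Bool.or_assoc] using h8), List.find?_cons_of_pos (by simpa only [List.any_cons, List.any_nil, Bool.or_false, Bool.or_assoc] using h9)]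
                    rw [if_pos h9, hc]
                  · rw [if_neg h9]
                    by_cases h10 : (PySem.Str.isIn "/brapi" p) = true
                    · have hc : pvClassify p = some "brapi" := by
                        unfold pvClassify pvRules
                        rw [if_neg h1]
                        rw [List.find?_cons_of_neg (by simpa only [List.any_cons, List.any_nil, Bool.or_false, Bool.or_assoc] using h2), List.find?_cons_of_neg (by simpa only [List.any_cons, List.any_nil, Bool.or_false, Bool.or_assoc] using h3), List.find?_cons_of_neg (by simpa only [List.any_cons, List.any_nil, Bool.or_false, Bool.or_assoc] using h4), List.find?_cons_of_neg (by simpa only [List.any_cons, List.any_nil, Bool.or_false, Bool.or_assoc] using h5), List.find?_cons_of_neg (by simpa only [List.any_cons, List.any_nil, Bool.or_false, Bool.or_assoc] using h6), List.find?_cons_of_neg (by simpa only [List.any_cons, List.any_nil, Bool.or_false, Bool.or_assoc] using h7), List.find?_cons_of_neg (by simpa only [List.any_cons, List.any_nil, Bool.or_false, Bool.or_assoc] using h8), List.find?_cons_of_neg (by simpa only [List.any_cons, List.any_nil, Bool.or_false, Bool.or_assoc] using h9), List.find?_cons_of_pos (by simpa only [List.any_cons, List.any_nil, Bool.or_false,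 Bool.or_assoc] using h10)]
                      rw [if_pos h10, hc]
                    · rw [if_neg h10]
                      by_cases h11 : (PySem.Str.isIn "/api/v2/interop" p || PySem.Str.isIn "/integration" p) = true
                      · have hc : pvClassify p = some "interop" := by
                          unfold pvClassify pvRules
                          rw [if_neg h1]
                          rw [List.find?_cons_of_neg (by simpa only [List.any_cons, List.any_nil, Bool.or_false, Bool.or_assoc] using h2), List.find?_cons_of_neg (by simpa only [List.any_cons, List.any_nil, Bool.or_false, Bool.or_assoc] using h3), List.find?_cons_of_neg (by simpa only [List.any_cons, List.any_nil, Bool.or_false, Bool.or_assoc] using h4), List.find?_cons_of_neg (by simpa only [List.any_cons, List.any_nil, Bool.or_false, Bool.or_assoc] using h5), List.find?_cons_of_neg (by simpa only [List.any_cons, List.any_nil, Bool.or_false, Bool.or_assoc] using h6), List.find?_cons_of_neg (by simpa only [List.any_cons, List.any_nil, Bool.or_false, Bool.or_assoc] using h7), List.find?_cons_of_neg (by simpa only [List.any_cons, List.any_nil, Bool.or_false, Bool.or_assoc] using h8), List.find?_cons_of_neg (by simpa only [List.any_cons, List.any_nil, Bool.or_false, Bool.or_assoc] using h9), List.find?_cons_of_neg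 (by simpa only [List.any_cons, List.any_nil, Bool.or_false, Bool.or_assoc] using h10), List.find?_cons_of_pos (by simpa only [List.any_cons, List.any_nil, Bool.or_false, Bool.or_assoc] using h11)]
                        rw [if_pos h11, hc]
                      · rw [if_neg h11]
                        have hc : pvClassify p = some "uncategorized" := by
                          unfold pvClassify pvRules
                          rw [if_neg h1]
                          rw [List.find?_cons_of_neg (by simpa only [List.any_cons, List.any_nil, Bool.or_false, Bool.or_assoc] using h2), List.find?_cons_of_neg (by simpa only [List.any_cons, List.any_nil, Bool.or_false, Bool.or_assoc] using h3), List.find?_cons_of_neg (by simpa only [List.any_cons, List.any_nil, Bool.or_false, Bool.or_assoc] using h4), List.find?_cons_of_neg (by simpa only [List.any_cons, List.any_nil, Bool.or_false, Bool.or_assoc] using h5), List.find?_cons_of_neg (by simpa only [List.any_cons, List.any_nil, Bool.or_false, Bool.or_assoc] using h6), List.find?_cons_of_neg (by simpa only [List.any_cons, List.any_nil, Bool.or_false, Bool.or_assoc] using h7), List.find?_cons_of_neg (by simpa only [List.any_cons, List.any_nil, Bool.or_false, Bool.or_assoc] using h8), List.find?_cons_of_neg (by simpa only [List.any_cons, List.any_nil,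 Bool.or_false, Bool.or_assoc] using h9), List.find?_cons_of_neg (by simpa only [List.any_cons, List.any_nil, Bool.or_false, Bool.or_assoc] using h10), List.find?_cons_of_neg (by simpa only [List.any_cons, List.any_nil, Bool.or_false, Bool.or_assoc] using h11), List.find?_nil]
                        rw [hc]

-- classifier results are keys of the result dict
theorem pvClassify_mem (p : String) (k : String) (h : pvClassify p = some k) : k ∈ pvOrder := by
  unfold pvClassify at h
  by_cases hd : p ∈ ["/openapi.json", "/docs", "/redoc", "/health"]
  · rw [if_pos hd] at h; cases h
  · rw [if_neg hd] at h
    rcases hf : List.find? (fun rule => rule.2.any fun sub => PySem.Str.isIn sub p) pvRules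
      with _ | rule
    · rw [hf] at h
      have hk : "uncategorized" = k := by injection h
      subst hk; decide
    · rw [hf] at h
      have hk : rule.1 = k := by injection h
      subst hk
      exact (by decide : ∀ q ∈ pvRules, q.1 ∈ pvOrder) rule (List.mem_of_find?_eq_some hf)

-- modify on the literal-keyed dict, pointwise
set_option maxHeartbeats 2000000 in
theorem pvModify_mk (f : String → List (String × String × String)) (k : String)
    (hk : k ∈ pvOrder)
    (g : List (String × String × String) → List (String × String × String)) :
    (PySem.Dict.mk (pvOrder.map (fun n => (n, f n)))).modify k [] g
      = PySem.Dict.mk (pvOrder.map (fun n => (n, if n = k then g (f n) else f n))) := by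
  simp only [pvOrder, List.mem_cons, List.not_mem_nil, or_false] at hk
  rcases hk with rfl | rfl | rfl | rfl | rfl | rfl | rfl | rfl | rfl | rfl | rfl <;>
    simp [pvOrder, PySem.Dict.modify, PySem.Dict.insert, PySem.Dict.getD, PySem.Dict.get?,
      PySem.Dict.contains]

theorem pvStepA_eq (f : String → List (String × String × String)) (r : String × String × String) :
    pvStepA (PySem.Dict.mk (pvOrder.map (fun n => (n, f n)))) r
      = PySem.Dict.mk (pvOrder.map (fun n => (n, pvBump f r n))) := by
  rw [pvStepA_classify]
  cases h : pvClassify r.2.1 with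
  | none => simp [pvBump, h]
  | some k =>
    dsimp only
    rw [pvModify_mk f k (pvClassify_mem r.2.1 k h)]
    congr 1
    apply List.map_congr_left
    intro n _
    simp [pvBump, h]

theorem pvFold_eq (rs : List (String × String × String)) (f : String → List (String × String × String)) :
    rs.foldl pvStepA (PySem.Dict.mk (pvOrder.map (fun n => (n, f n))))
      = PySem.Dict.mk (pvOrder.map (fun n =>
          (n, f n ++ rs.filter (fun r => pvClassify r.2.1 == some n)))) := by
  induction rs generalizing f with
  | nil => simp
  | cons r rs ih =>
    rw [List.foldl_cons, pvStepA_eq, ih]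
    congr 1
    apply List.map_congr_left
    intro n _
    simp only [pvBump, List.filter_cons]
    cases h : pvClassify r.2.1 with
    | none => simp
    | some k =>
      by_cases hk : n = k
      · subst hk; simp
      · simp [Ne.symm hk, hk]

-- ===== VERDICT (by name: the statement is the Claim_ definition above) =====
theorem categorize_routes_by_domain_spec : Claim_equal_categorize_routes_by_domain := by
  intro routes _
  unfold Spec_categorize_routes_by_domain categorize_routes_by_domain categorize_routes_by_domain_alt
  have h0 : PySem.Dict.mk [("core", ([] : List (String × String × String))), ("breeding", []), ("genomics", []), ("phenotyping", []),
      ("germplasm", []), ("environment", []), ("spatial", []), ("ai", []),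
      ("interop", []), ("brapi", []), ("uncategorized", [])]
      = PySem.Dict.mk (pvOrder.map (fun n => (n, (fun _ => ([] : List (String × String × String))) n))) := by
    rfl
  rw [h0]
  show (routes.foldl pvStepA (PySem.Dict.mk (pvOrder.map (fun n => (n, (fun _ => ([] : List (String × String × String))) n))))).items = _
  rw [pvFold_eq]
  simp
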